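-- pv_equiv track=rewrite | github.com/speedmode123/semsim_bcr | mcp_manager.py | get_switch_for_mcp
-- ===== SOURCE A (Python) =====
-- def get_switch_for_mcp(PduLines, Pos_to_ON, Pos_to_OFF):
--     if PduLines != 0:
--         idx = 0
--         for k,v in PduLines.items():
--                 match k:
--                     case "HighPwHeaterEnSel":
--                         htr_hp = list(format(int(v), '024b'))
--                         htr_hp.reverse()
--                         for p in htr_hp[0:18]:
--                             if int(p) == 1:
--                                 Pos_to_ON.append(idx)
--                             else:
--                                 Pos_to_OFF.append(idx)
--                             idx = idx + 1
--                         #LOGGER.info(f"{k} FLPos_to_ON : {Pos_to_ON} |  FLPos_to_OFF : {Pos_to_OFF}")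
--                     case "LowPwHeaterEnSel":
--                         htr_lp = list(format(int(v), '024b'))
--                         htr_lp.reverse()
--                         for p in htr_lp[0:18]:
--                             if int(p) == 1:
--                                 Pos_to_ON.append(idx)
--                             else:
--                                 Pos_to_OFF.append(idx)
--                             idx = idx + 1
--                         #LOGGER.info(f"{k} FLPos_to_ON : {Pos_to_ON} |  FLPos_to_OFF : {Pos_to_OFF}")
--                     case "AvionicLoadEnSel":
--                         av_load = list(format(int(v), '016b'))
--                         av_load.reverse()
--                         for p in av_load[0:10]:
--                             if int(p) == 1:
--                                 Pos_to_ON.append(idx)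
--                             else:
--                                 Pos_to_OFF.append(idx)
--                             idx = idx + 1
--                         #LOGGER.info(f"{k} FLPos_to_ON : {Pos_to_ON} |  FLPos_to_OFF : {Pos_to_OFF}")
--                     case "HdrmEnSel":
--                         hdrm_load = list(format(int(v), '016b'))
--                         hdrm_load.reverse()
--                         for p in hdrm_load[0:10]:
--                             if int(p) == 1:
--                                 Pos_to_ON.append(idx)
--                             else:
--                                 Pos_to_OFF.append(idx)
--                             idx = idx + 1
--                         #LOGGER.info(f"{k} FLPos_to_ON : {Pos_to_ON} |  FLPos_to_OFF : {Pos_to_OFF}")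
--                     case "ReactionWheelEnSel":
--                         rw_load = list(format(int(v), '016b'))
--                         rw_load.reverse()
--                         for p in rw_load[0:4]:
--                             if int(p) == 1:
--                                 Pos_to_ON.append(idx)
--                             else:
--                                 Pos_to_OFF.append(idx)
--                             idx = idx + 1
--                         #LOGGER.info(f"{k} FLPos_to_ON : {Pos_to_ON} |  FLPos_to_OFF : {Pos_to_OFF}")
--                     case "PropEnSel":
--                         prop_load = list(format(int(v), '008b'))
--                         prop_load.reverse()
--                         for p in prop_load[0:2]:
--                             if int(p) == 1:
--                                 Pos_to_ON.append(idx)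
--                             else:
--                                 Pos_to_OFF.append(idx)
--                             idx = idx + 1
--                         #LOGGER.info(f"{k} FLPos_to_ON : {Pos_to_ON} |  FLPos_to_OFF : {Pos_to_OFF}")
--                     case "StAndMagEnSel":
--                         stm_load = list(format(int(v), '008b'))
--                         stm_load.reverse()
--                         for p in stm_load[0:3]:
--                             if int(p) == 1:
--                                 Pos_to_ON.append(idx)
--                             else:
--                                 Pos_to_OFF.append(idx)
--                             idx = idx + 1
--                         #LOGGER.info(f"{k} FLPos_to_ON : {Pos_to_ON} |  FLPos_to_OFF : {Pos_to_OFF}")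
--                     case "IsolatedPwEnSel":
--                         iso_load = list(format(int(v), '008b'))
--                         iso_load.reverse()
--                         for p in iso_load[0:3]:
--                             if int(p) == 1:
--                                 Pos_to_ON.append(idx)
--                             else:
--                                 Pos_to_OFF.append(idx)
--                             idx = idx + 1
--                         #LOGGER.info(f"{k} FLPos_to_ON : {Pos_to_ON} |  FLPos_to_OFF : {Pos_to_OFF}")
--                     case  _:
--                         pass
--     else:
--         pass
--     return Pos_to_ON, Pos_to_OFF
-- ===== SOURCE B (Python) =====
-- # Different algorithm: instead of walking every bit position LSB-first with a
-- # running counter, each key's value is masked to its selector width and the ON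
-- # positions are extracted SPARSELY with the lowest-set-bit trick (t & -t); the
-- # OFF positions come from the same extraction applied to the complement within
-- # the mask.  Both lists are bulk-extended per key; no per-bit branch, no counter
-- # stepping through every bit.  Appends in place like the original.
-- _PDU_BITS = {
--     "HighPwHeaterEnSel": 18,
--     "LowPwHeaterEnSel": 18,
--     "AvionicLoadEnSel": 10,
--     "HdrmEnSel": 10,
--     "ReactionWheelEnSel": 4,
--     "PropEnSel": 2,
--     "StAndMagEnSel": 3,
--     "IsolatedPwEnSel": 3,
-- }
--
-- def _set_bit_positions(t):
--     # ascending indices of the set bits of t >= 0, via repeated lowest-set-bit removal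
--     pos = []
--     while t:
--         low = t & -t
--         pos.append(low.bit_length() - 1)
--         t ^= low
--     return pos
--
-- def get_switch_for_mcp(PduLines, Pos_to_ON, Pos_to_OFF):
--     idx = 0
--     for k, v in PduLines.items():
--         n = _PDU_BITS.get(k)
--         if n is None:
--             continue
--         mask = (1 << n) - 1
--         t = abs(int(v)) & mask
--         Pos_to_ON.extend(idx + j for j in _set_bit_positions(t))
--         Pos_to_OFF.extend(idx + j for j in _set_bit_positions(t ^ mask))
--         idx += n
--     return Pos_to_ON, Pos_to_OFF
-- ===== Notes on version B (the rewrite author's own statement) =====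
-- stated objective: alternative
-- what changed: Replaces the eight match arms of format/reverse/slice string walking (one append per bit with a running counter) by a width table plus sparse lowest-set-bit extraction: ON positions are pulled directly from the masked value via t&-t, OFF positions from its complement within the mask, and both lists are bulk-extended per key.
import Mathlib
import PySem

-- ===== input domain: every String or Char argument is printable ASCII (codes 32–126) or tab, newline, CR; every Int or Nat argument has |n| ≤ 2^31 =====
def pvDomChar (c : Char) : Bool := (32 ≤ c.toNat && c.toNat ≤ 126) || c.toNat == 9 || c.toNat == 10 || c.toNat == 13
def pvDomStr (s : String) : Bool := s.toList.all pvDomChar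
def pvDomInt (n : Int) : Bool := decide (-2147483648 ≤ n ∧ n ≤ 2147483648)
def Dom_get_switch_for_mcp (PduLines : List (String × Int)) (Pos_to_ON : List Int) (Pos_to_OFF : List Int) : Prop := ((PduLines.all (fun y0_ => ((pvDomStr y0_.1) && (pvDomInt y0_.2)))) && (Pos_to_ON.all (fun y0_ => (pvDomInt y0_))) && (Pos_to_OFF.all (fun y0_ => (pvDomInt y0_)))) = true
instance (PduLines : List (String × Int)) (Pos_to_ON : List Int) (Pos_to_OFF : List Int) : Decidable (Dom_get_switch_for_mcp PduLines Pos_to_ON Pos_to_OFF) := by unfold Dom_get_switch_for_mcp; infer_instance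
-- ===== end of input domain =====

-- B replaces A's eight copy-pasted match arms (format / list / reverse / slice of a binary
-- digit string, one append per bit position) by a key→width table and SPARSE lowest-set-bit
-- extraction (t & -t) on the masked value and on its complement, bulk-extending each list
-- per key; objective: alternative.  A appends to Pos_to_ON / Pos_to_OFF in place (so does
-- B); the equivalence proved here is about the returned pair.

-- ===== PORT A =====
-- binary digits of a natural number, LEAST significant first ([] for 0)
def pvBitsLSB : Nat → List Char
  | 0 => []
  | t+1 => (if (t+1) % 2 == 1 then '1' else '0') :: pvBitsLSB ((t+1)/2)
decreasing_by exact Nat.div_lt_self (Nat.succ_pos t) (by omega)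

-- binary digits, most significant first, of a natural number (Python's format(t, 'b'))
def pvNatBin (t : Nat) : List Char := if t = 0 then ['0'] else (pvBitsLSB t).reverse

def pvPad (l : List Char) (w : Nat) : List Char := List.replicate (w - l.length) '0' ++ l

-- list(format(v, '0<w>b')): sign-and-magnitude, zero-padded to total width w (sign included)
def pvFormatB (v : Int) (w : Nat) : List Char :=
  if v < 0 then '-' :: pvPad (pvNatBin v.natAbs) (w - 1) else pvPad (pvNatBin v.natAbs) w

-- the shared inner loop body of every match arm; `int(p) == 1` is ported as `p == '1'`,
-- exact here because the sliced prefix contains only '0'/'1' (the sign character, if any,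
-- sits at the far end of the reversed list, beyond every slice used)
def pvStepA (st : Int × List Int × List Int) (p : Char) : Int × List Int × List Int :=
  match st with
  | (idx, on, off) => if p == '1' then (idx + 1, on ++ [idx], off) else (idx + 1, on, off ++ [idx])

def pvLoopA (ps : List Char) (st : Int × List Int × List Int) : Int × List Int × List Int :=
  ps.foldl pvStepA st

-- `if PduLines != 0` is identically True for a dict, so the guarded branch is always taken.
-- The match/case on k is ported as the equivalent ordered chain of string comparisons.
def get_switch_for_mcp (PduLines : List (String × Int)) (Pos_to_ON : List Int) (Pos_to_OFF : List Int) : List Int × List Int :=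
  let st := PduLines.foldl (fun st kv =>
    let k := kv.1
    let v := kv.2
    if k == "HighPwHeaterEnSel" then pvLoopA (((pvFormatB v 24).reverse).take 18) st
    else if k == "LowPwHeaterEnSel" then pvLoopA (((pvFormatB v 24).reverse).take 18) st
    else if k == "AvionicLoadEnSel" then pvLoopA (((pvFormatB v 16).reverse).take 10) st
    else if k == "HdrmEnSel" then pvLoopA (((pvFormatB v 16).reverse).take 10) st
    else if k == "ReactionWheelEnSel" then pvLoopA (((pvFormatB v 16).reverse).take 4) st
    else if k == "PropEnSel" then pvLoopA (((pvFormatB v 8).reverse).take 2) st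
    else if k == "StAndMagEnSel" then pvLoopA (((pvFormatB v 8).reverse).take 3) st
    else if k == "IsolatedPwEnSel" then pvLoopA (((pvFormatB v 8).reverse).take 3) st
    else st) ((0 : Int), Pos_to_ON, Pos_to_OFF)
  (st.2.1, st.2.2)

-- ===== PORT B =====
def pvPduBits : PySem.Dict String Nat := PySem.Dict.mk
  [("HighPwHeaterEnSel", 18), ("LowPwHeaterEnSel", 18), ("AvionicLoadEnSel", 10),
   ("HdrmEnSel", 10), ("ReactionWheelEnSel", 4), ("PropEnSel", 2),
   ("StAndMagEnSel", 3), ("IsolatedPwEnSel", 3)]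

-- _set_bit_positions: ascending set-bit indices via repeated lowest-set-bit removal;
-- Python's `t & -t` on t > 0 is the lowest set bit, i.e. t - (t &&& (t-1)) on Nat,
-- and `low.bit_length() - 1` is Nat.log2 low (low > 0) — exact on the naturals used here
def pvSetBits (t : Nat) : List Nat :=
  if h : t = 0 then []
  else (t - (t &&& (t - 1))).log2 :: pvSetBits (t &&& (t - 1))
decreasing_by
  have h1 : t &&& (t - 1) ≤ t - 1 := Nat.and_le_right
  omega

def get_switch_for_mcp_alt (PduLines : List (String × Int)) (Pos_to_ON : List Int) (Pos_to_OFF : List Int) : List Int × List Int :=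
  let st := PduLines.foldl (fun st kv =>
    match pvPduBits.get? kv.1 with
    | none => st
    | some n =>
      let mask := 2 ^ n - 1
      let t := kv.2.natAbs &&& mask
      (st.1 + (n : Int),
       st.2.1 ++ (pvSetBits t).map (fun j => st.1 + (j : Int)),
       st.2.2 ++ (pvSetBits (t ^^^ mask)).map (fun j => st.1 + (j : Int)))) ((0 : Int), Pos_to_ON, Pos_to_OFF)
  (st.2.1, st.2.2)

-- ===== PRECONDITION & SPEC =====
def Spec_get_switch_for_mcp (PduLines : List (String × Int)) (Pos_to_ON : List Int) (Pos_to_OFF : List Int) (out : List Int × List Int) : Prop := out = get_switch_for_mcp_alt PduLines Pos_to_ON Pos_to_OFF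
instance (PduLines : List (String × Int)) (Pos_to_ON : List Int) (Pos_to_OFF : List Int) (out : List Int × List Int) : Decidable (Spec_get_switch_for_mcp PduLines Pos_to_ON Pos_to_OFF out) := by unfold Spec_get_switch_for_mcp; infer_instance

-- ===== CLAIM (what is proved, stated in full; the proofs are below) =====
def Claim_equal_get_switch_for_mcp : Prop := ∀ (PduLines : List (String × Int)) (Pos_to_ON : List Int) (Pos_to_OFF : List Int), Dom_get_switch_for_mcp PduLines Pos_to_ON Pos_to_OFF → Spec_get_switch_for_mcp PduLines Pos_to_ON Pos_to_OFF (get_switch_for_mcp PduLines Pos_to_ON Pos_to_OFF)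

-- ===== LEMMAS AND PROOFS =====

-- proof-only bridge step: A's per-character loop re-expressed as a fold over bit indices
def pvStepR (t : Nat) (st : Int × List Int × List Int) (j : Nat) : Int × List Int × List Int :=
  match st with
  | (idx, on, off) => if t.testBit j then (idx + 1, on ++ [idx], off) else (idx + 1, on, off ++ [idx])

lemma pvBitsLSB_succ (t : Nat) :
    pvBitsLSB (t+1) = (if (t+1) % 2 == 1 then '1' else '0') :: pvBitsLSB ((t+1)/2) := by
  rw [pvBitsLSB]

-- the first n characters of (lsb-first digits of t, then zero padding) are exactly t's bits
lemma pv_take_bits : ∀ (n t k : Nat), n ≤ (pvBitsLSB t).length + k →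
    (pvBitsLSB t ++ List.replicate k '0').take n
      = (List.range n).map (fun j => if t.testBit j then '1' else '0') := by
  intro n
  induction n with
  | zero => intro t k h; simp
  | succ n ih =>
    intro t k h
    cases t with
    | zero =>
      simp only [pvBitsLSB, List.nil_append, List.length_nil, Nat.zero_add] at h ⊢
      rw [List.take_replicate, Nat.min_eq_left h]
      simp
    | succ t =>
      rw [pvBitsLSB_succ, List.range_succ_eq_map]
      simp only [List.cons_append, List.take_succ_cons, List.map_cons, List.map_map]
      congr 1
      · rw [Nat.testBit_zero]
        rcases Nat.mod_two_eq_zero_or_one (t+1) with h2 | h2 <;> simp [h2]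
      · rw [ih ((t+1)/2) k (by rw [pvBitsLSB_succ] at h; simp at h; omega)]
        apply List.map_congr_left
        intro j _
        simp [Nat.testBit_add_one]

lemma pv_pad_rev_take (t m n : Nat) (h : n ≤ m) :
    ((pvPad (pvNatBin t) m).reverse).take n
      = (List.range n).map (fun j => if t.testBit j then '1' else '0') := by
  rcases Nat.eq_zero_or_pos n with hn | hn
  · subst hn; simp
  by_cases ht : t = 0
  · subst ht
    have hm : 1 ≤ m := le_trans hn h
    have h0 : pvNatBin 0 = ['0'] := by simp [pvNatBin]
    rw [h0]
    unfold pvPad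
    rw [List.reverse_append, List.reverse_replicate]
    have hrw : (['0'] : List Char).reverse ++ List.replicate (m - List.length ['0']) '0'
        = pvBitsLSB 0 ++ List.replicate m '0' := by
      simp only [pvBitsLSB, List.nil_append, List.reverse_cons, List.reverse_nil,
        List.length_singleton]
      have h1m : m = 1 + (m - 1) := by omega
      rw [h1m, List.replicate_add]
      simp
    rw [hrw, pv_take_bits n 0 m (by simp [pvBitsLSB]; omega)]
  · have h0 : pvNatBin t = (pvBitsLSB t).reverse := by simp [pvNatBin, ht]
    rw [h0]
    unfold pvPad
    rw [List.reverse_append, List.reverse_replicate, List.reverse_reverse]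
    apply pv_take_bits
    rw [List.length_reverse]
    omega

lemma pv_fmt_take (v : Int) (w n : Nat) (h : n + 1 ≤ w) :
    ((pvFormatB v w).reverse).take n
      = (List.range n).map (fun j => if v.natAbs.testBit j then '1' else '0') := by
  unfold pvFormatB
  by_cases hv : v < 0
  · simp only [if_pos hv, List.reverse_cons]
    rw [List.take_append_of_le_length]
    · exact pv_pad_rev_take v.natAbs (w - 1) n (by omega)
    · simp only [List.length_reverse, pvPad, List.length_append, List.length_replicate]
      omega
  · simp only [if_neg hv]
    exact pv_pad_rev_take v.natAbs w n (by omega)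

lemma pv_loop_eq (v : Int) (w n : Nat) (st : Int × List Int × List Int) (h : n + 1 ≤ w) :
    pvLoopA (((pvFormatB v w).reverse).take n) st = (List.range n).foldl (pvStepR v.natAbs) st := by
  unfold pvLoopA
  rw [pv_fmt_take v w n h, List.foldl_map]
  apply PySem.List.foldl_congr_mem
  intro acc j _
  obtain ⟨idx, on, off⟩ := acc
  cases hb : v.natAbs.testBit j <;> simp [pvStepA, pvStepR, hb]

-- pvSetBits m lists exactly the set-bit positions of m < 2^n, ascending
lemma pv_filter_split : ∀ (len s : Nat) (p q : Nat → Bool) (k : Nat),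
    s ≤ k → k < s + len → (∀ j, j < k → p j = false) → p k = true → q k = false →
    (∀ j, j ≠ k → p j = q j) →
    (List.range' s len).filter p = k :: (List.range' s len).filter q := by
  intro len
  induction len with
  | zero => intro s p q k h1 h2; omega
  | succ len ih =>
    intro s p q k h1 h2 hlt hpk hqk hpq
    rw [List.range'_succ]
    by_cases hs : s = k
    · subst hs
      have hcong : (List.range' (s+1) len).filter p = (List.range' (s+1) len).filter q := by
        apply List.filter_congr
        intro j hj
        have := (List.mem_range'_1.mp hj).1
        exact hpq j (by omega)
      simp only [List.filter_cons, hpk, hqk]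
      simp [hcong]
    · have hps : p s = false := hlt s (by omega)
      have hqs : q s = false := by rw [← hpq s (by omega)]; exact hps
      rw [List.filter_cons, List.filter_cons, hps, hqs]
      simp only [Bool.false_eq_true, if_false]
      exact ih (s+1) p q k (by omega) (by omega) hlt hpk hqk hpq

lemma pvSetBits_eq_filter : ∀ (m n : Nat), m < 2 ^ n →
    pvSetBits m = (List.range n).filter (fun j => m.testBit j) := by
  intro m
  induction m using Nat.strong_induction_on with
  | _ m ih =>
    intro n hmn
    by_cases hm : m = 0
    · subst hm
      rw [pvSetBits]
      simp [Nat.zero_testBit]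
    · obtain ⟨k, o, hodd, hme⟩ := Nat.exists_eq_two_pow_mul_odd hm
      obtain ⟨a, ha⟩ := hodd
      have hme' : m = 2 ^ (k+1) * a + 2 ^ k := by
        subst ha; rw [hme]; ring
      have hsub : m - 1 = 2 ^ (k+1) * a + (2 ^ k - 1) := by
        have : 0 < 2 ^ k := Nat.two_pow_pos k
        omega
      have hky : 2 ^ k < 2 ^ (k+1) := Nat.pow_lt_pow_right (by omega) (by omega)
      have hbm : ∀ j, m.testBit j = if j < k+1 then (2 ^ k).testBit j else a.testBit (j - (k+1)) := by
        intro j; rw [hme', Nat.testBit_two_pow_mul_add a hky j]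
      have hbm1 : ∀ j, (m-1).testBit j = if j < k+1 then (2 ^ k - 1).testBit j else a.testBit (j - (k+1)) := by
        intro j; rw [hsub, Nat.testBit_two_pow_mul_add a (by omega) j]
      have hbm0 : ∀ j, (2 ^ (k+1) * a).testBit j = if j < k+1 then false else a.testBit (j - (k+1)) := by
        intro j
        have h := Nat.testBit_two_pow_mul_add a (b := 0) (Nat.two_pow_pos (k+1)) j
        simpa [Nat.zero_testBit] using h
      have hand : m &&& (m - 1) = 2 ^ (k+1) * a := by
        apply Nat.eq_of_testBit_eq
        intro j
        rw [Nat.testBit_and, hbm j, hbm1 j, hbm0 j]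
        by_cases hj : j < k + 1
        · simp only [if_pos hj, Nat.testBit_two_pow, Nat.testBit_two_pow_sub_one]
          by_cases hjk : j = k
          · simp [hjk]
          · simp
            omega
        · simp [hj]
      have hlow : m - (m &&& (m - 1)) = 2 ^ k := by rw [hand]; omega
      have hlt : m &&& (m - 1) < m := by
        rw [hand]
        have : 0 < 2 ^ k := Nat.two_pow_pos k
        omega
      have hlt2 : m &&& (m - 1) < 2 ^ n := lt_of_le_of_lt (le_of_lt hlt) hmn
      have hkn : k < n := by
        have h1 : 2 ^ k ≤ m := by
          rw [hme']
          have : 0 ≤ 2 ^ (k+1) * a := Nat.zero_le _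
          omega
        have h2 : 2 ^ k < 2 ^ n := lt_of_le_of_lt h1 hmn
        exact (Nat.pow_lt_pow_iff_right (by omega)).mp h2
      have hlow' : m - 2 ^ (k+1) * a = 2 ^ k := by
        have := Nat.two_pow_pos k; omega
      have hlt' : 2 ^ (k+1) * a < m := by rw [← hand]; exact hlt
      have hlt2' : 2 ^ (k+1) * a < 2 ^ n := by rw [← hand]; exact hlt2
      rw [pvSetBits]
      simp only [hm, dite_false, hand, hlow']
      rw [ih (2 ^ (k+1) * a) hlt' n hlt2', Nat.log2_two_pow, List.range_eq_range']
      symm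
      apply pv_filter_split n 0 _ _ k (by omega) (by omega)
      · intro j hj
        rw [hbm j]
        simp only [if_pos (by omega : j < k + 1), Nat.testBit_two_pow]
        simp; omega
      · rw [hbm k]
        simp
      · rw [hbm0 k]
        simp
      · intro j hj
        rw [hbm j, hbm0 j]
        by_cases h : j < k + 1
        · simp only [if_pos h, Nat.testBit_two_pow]
          simp; omega
        · simp [h]

-- A's range fold produces exactly the filter-partition B bulk-appends
lemma pv_fold_to_filter : ∀ (n : Nat) (t : Nat) (idx : Int) (on off : List Int),
    (List.range n).foldl (pvStepR t) (idx, on, off)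
      = (idx + (n : Int),
         on ++ ((List.range n).filter (fun j => t.testBit j)).map (fun j => idx + (j : Int)),
         off ++ ((List.range n).filter (fun j => !t.testBit j)).map (fun j => idx + (j : Int))) := by
  intro n
  induction n with
  | zero => intro t idx on off; simp
  | succ n ih =>
    intro t idx on off
    rw [List.range_succ, List.foldl_append, ih]
    cases hb : t.testBit n <;>
      simp [pvStepR, hb, List.filter_append] <;> ring_nf

lemma pv_on_bits (v : Int) (n : Nat) :
    (pvSetBits (v.natAbs &&& (2 ^ n - 1)))
      = (List.range n).filter (fun j => v.natAbs.testBit j) := by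
  have hlt : v.natAbs &&& (2 ^ n - 1) < 2 ^ n :=
    lt_of_le_of_lt Nat.and_le_right (by have := Nat.two_pow_pos n; omega)
  rw [pvSetBits_eq_filter _ n hlt]
  apply List.filter_congr
  intro j hj
  have hjn := List.mem_range.mp hj
  simp [hjn]

lemma pv_off_bits (v : Int) (n : Nat) :
    (pvSetBits ((v.natAbs &&& (2 ^ n - 1)) ^^^ (2 ^ n - 1)))
      = (List.range n).filter (fun j => !v.natAbs.testBit j) := by
  have hpos : 0 < 2 ^ n := Nat.two_pow_pos n
  have h1 : v.natAbs &&& (2 ^ n - 1) < 2 ^ n := lt_of_le_of_lt Nat.and_le_right (by omega)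
  have hlt : (v.natAbs &&& (2 ^ n - 1)) ^^^ (2 ^ n - 1) < 2 ^ n :=
    Nat.xor_lt_two_pow h1 (by omega)
  rw [pvSetBits_eq_filter _ n hlt]
  apply List.filter_congr
  intro j hj
  have hjn := List.mem_range.mp hj
  simp only [Nat.testBit_xor, Nat.testBit_and, Nat.testBit_two_pow_sub_one]
  cases hb : v.natAbs.testBit j <;> simp [hjn]

lemma pv_key_step (v : Int) (n : Nat) (st : Int × List Int × List Int) :
    (List.range n).foldl (pvStepR v.natAbs) st
      = (st.1 + (n : Int),
         st.2.1 ++ (pvSetBits (v.natAbs &&& (2 ^ n - 1))).map (fun j => st.1 + (j : Int)),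
         st.2.2 ++ (pvSetBits ((v.natAbs &&& (2 ^ n - 1)) ^^^ (2 ^ n - 1))).map (fun j => st.1 + (j : Int))) := by
  obtain ⟨idx, on, off⟩ := st
  rw [pv_fold_to_filter, pv_on_bits, pv_off_bits]

lemma pv_step_eq :
    (fun (st : Int × List Int × List Int) (kv : String × Int) =>
      let k := kv.1
      let v := kv.2
      if k == "HighPwHeaterEnSel" then pvLoopA (((pvFormatB v 24).reverse).take 18) st
      else if k == "LowPwHeaterEnSel" then pvLoopA (((pvFormatB v 24).reverse).take 18) st
      else if k == "AvionicLoadEnSel" then pvLoopA (((pvFormatB v 16).reverse).take 10) st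
      else if k == "HdrmEnSel" then pvLoopA (((pvFormatB v 16).reverse).take 10) st
      else if k == "ReactionWheelEnSel" then pvLoopA (((pvFormatB v 16).reverse).take 4) st
      else if k == "PropEnSel" then pvLoopA (((pvFormatB v 8).reverse).take 2) st
      else if k == "StAndMagEnSel" then pvLoopA (((pvFormatB v 8).reverse).take 3) st
      else if k == "IsolatedPwEnSel" then pvLoopA (((pvFormatB v 8).reverse).take 3) st
      else st)
    = (fun st kv =>
      match pvPduBits.get? kv.1 with
      | none => st
      | some n =>
        let mask := 2 ^ n - 1
        let t := kv.2.natAbs &&& mask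
        (st.1 + (n : Int),
         st.2.1 ++ (pvSetBits t).map (fun j => st.1 + (j : Int)),
         st.2.2 ++ (pvSetBits (t ^^^ mask)).map (fun j => st.1 + (j : Int)))) := by
  funext st kv
  obtain ⟨k, v⟩ := kv
  simp only [pvPduBits]
  by_cases h1 : ("HighPwHeaterEnSel" : String) = k
  · subst h1; simp [PySem.Dict.get?_mk_cons, pv_loop_eq v 24 18 st (by omega), pv_key_step]
  by_cases h2 : ("LowPwHeaterEnSel" : String) = k
  · subst h2; simp [PySem.Dict.get?_mk_cons, pv_loop_eq v 24 18 st (by omega), pv_key_step]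
  by_cases h3 : ("AvionicLoadEnSel" : String) = k
  · subst h3; simp [PySem.Dict.get?_mk_cons, pv_loop_eq v 16 10 st (by omega), pv_key_step]
  by_cases h4 : ("HdrmEnSel" : String) = k
  · subst h4; simp [PySem.Dict.get?_mk_cons, pv_loop_eq v 16 10 st (by omega), pv_key_step]
  by_cases h5 : ("ReactionWheelEnSel" : String) = k
  · subst h5; simp [PySem.Dict.get?_mk_cons, pv_loop_eq v 16 4 st (by omega), pv_key_step]
  by_cases h6 : ("PropEnSel" : String) = k
  · subst h6; simp [PySem.Dict.get?_mk_cons, pv_loop_eq v 8 2 st (by omega), pv_key_step]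
  by_cases h7 : ("StAndMagEnSel" : String) = k
  · subst h7; simp [PySem.Dict.get?_mk_cons, pv_loop_eq v 8 3 st (by omega), pv_key_step]
  by_cases h8 : ("IsolatedPwEnSel" : String) = k
  · subst h8; simp [PySem.Dict.get?_mk_cons, pv_loop_eq v 8 3 st (by omega), pv_key_step]
  · simp [PySem.Dict.get?, h1, h2, h3, h4, h5, h6, h7, h8,
      Ne.symm h1, Ne.symm h2, Ne.symm h3, Ne.symm h4, Ne.symm h5, Ne.symm h6, Ne.symm h7,
      Ne.symm h8]

-- ===== VERDICT (by name: the statement is the Claim_ definition above) =====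
theorem get_switch_for_mcp_spec : Claim_equal_get_switch_for_mcp := by
  intro PduLines Pos_to_ON Pos_to_OFF _
  unfold Spec_get_switch_for_mcp get_switch_for_mcp get_switch_for_mcp_alt
  rw [pv_step_eq]
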